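-- pv_equiv track=rewrite | github.com/vikassrivastava18/Turing-prep | Python/problems.py | remove_common_counts
-- ===== SOURCE A (Python) =====
-- def remove_common_counts(l1: list, l2: list) -> int:
--     """
--         Remove minimum number of elements from two lists
--         To make them completely differnt
--     """
--     l1_unique = set(l1)
--     l2_unique = set(l2)
--
--     common_elements = l1_unique.intersection(l2_unique)
--
--     count = 0
--     for common in common_elements:
--         if l1.count(common) < l2.count(common):
--             count += l1.count(common)
--         elif l1.count(common) > l2.count(common):
--             count += l2.count(common)
--         else:
--             count += l1.count(common)
--
--     return count
-- ===== SOURCE B (Python) =====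
-- def remove_common_counts(l1: list, l2: list) -> int:
--     # Consume a multiset of l1 in a single pass over l2: each l2 element that
--     # still has remaining supply in l1 contributes 1; totals sum(min counts).
--     remaining = {}
--     for x in l1:
--         remaining[x] = remaining.get(x, 0) + 1
--     total = 0
--     for x in l2:
--         if remaining.get(x, 0) > 0:
--             total += 1
--             remaining[x] -= 1
--     return total
-- ===== Notes on version B (the rewrite author's own statement) =====
-- stated objective: faster
-- what changed: Replaces the set-intersection plus repeated list.count scans with one frequency map of l1 consumed by a single pass over l2.
import Mathlib
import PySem

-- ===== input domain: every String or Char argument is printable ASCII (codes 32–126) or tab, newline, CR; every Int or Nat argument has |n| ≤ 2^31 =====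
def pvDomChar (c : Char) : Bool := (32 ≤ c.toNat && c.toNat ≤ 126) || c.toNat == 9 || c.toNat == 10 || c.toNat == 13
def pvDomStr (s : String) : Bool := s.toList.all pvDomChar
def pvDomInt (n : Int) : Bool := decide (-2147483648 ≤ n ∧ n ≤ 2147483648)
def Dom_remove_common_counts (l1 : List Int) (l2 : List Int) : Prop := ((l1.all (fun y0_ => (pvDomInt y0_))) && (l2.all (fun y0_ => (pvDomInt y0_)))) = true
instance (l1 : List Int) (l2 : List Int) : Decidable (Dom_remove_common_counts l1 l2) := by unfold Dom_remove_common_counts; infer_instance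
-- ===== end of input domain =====

-- B replaces A's set-intersection + repeated list.count scans with a frequency
-- map of l1 consumed in a single pass over l2 (objective: faster).


-- ===== PORT A =====
-- (the loop over the common elements sums values independent of the set's
-- iteration order, so porting through PySem.Set's insertion order is exact)
def remove_common_counts (l1 : List Int) (l2 : List Int) : Int :=
  let l1_unique : PySem.Set Int := PySem.Set.ofList l1
  let l2_unique : PySem.Set Int := PySem.Set.ofList l2
  let common_elements := PySem.Set.inter l1_unique l2_unique
  common_elements.foldl (fun count common =>
    if PySem.List.count l1 common < PySem.List.count l2 common then
      count + (PySem.List.count l1 common : Int)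
    else if PySem.List.count l1 common > PySem.List.count l2 common then
      count + (PySem.List.count l2 common : Int)
    else
      count + (PySem.List.count l1 common : Int)) 0

-- ===== PORT B =====
def remove_common_counts_alt (l1 : List Int) (l2 : List Int) : Int :=
  let remaining : PySem.Dict Int Int :=
    l1.foldl (fun d x => d.insert x (d.getD x 0 + 1)) PySem.Dict.empty
  (l2.foldl (fun (s : Int × PySem.Dict Int Int) x =>
      if s.2.getD x 0 > 0 then (s.1 + 1, s.2.insert x (s.2.getD x 0 - 1)) else s)
    (0, remaining)).1

-- ===== PRECONDITION & SPEC =====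
def Spec_remove_common_counts (l1 : List Int) (l2 : List Int) (out : Int) : Prop := out = remove_common_counts_alt l1 l2
instance (l1 : List Int) (l2 : List Int) (out : Int) : Decidable (Spec_remove_common_counts l1 l2 out) := by unfold Spec_remove_common_counts; infer_instance

-- ===== CLAIM (what is proved, stated in full; the proofs are below) =====
def Claim_equal_remove_common_counts : Prop := ∀ (l1 : List Int) (l2 : List Int), Dom_remove_common_counts l1 l2 → Spec_remove_common_counts l1 l2 (remove_common_counts l1 l2)

-- ===== LEMMAS AND PROOFS =====

-- the shared value both programs compute: sum over the distinct elements of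
-- l2 (as a Finset) of min(count in l1, count in l2)
def pvMinSum (l1 l2 : List Int) : Int :=
  ∑ x ∈ l2.toFinset, min ((l1.count x : Int)) ((l2.count x : Int))

-- B's consuming loop, with an arbitrary nonnegative supply dict
theorem pv_loop_eq_sum (l2 : List Int) :
    ∀ (acc : Int) (d : PySem.Dict Int Int), (∀ x, 0 ≤ d.getD x 0) →
    (l2.foldl (fun (s : Int × PySem.Dict Int Int) x =>
        if s.2.getD x 0 > 0 then (s.1 + 1, s.2.insert x (s.2.getD x 0 - 1)) else s)
      (acc, d)).1
      = acc + ∑ x ∈ l2.toFinset, min (d.getD x 0) ((l2.count x : Int)) := by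
  induction l2 with
  | nil => intro acc d _; simp
  | cons a t ih =>
    intro acc d hd
    have hcnt : ∀ y : Int, (((a :: t).count y : Int)) = (t.count y : Int) + (if y = a then 1 else 0) := by
      intro y
      by_cases h : y = a <;> simp [List.count_cons, h] <;> omega
    by_cases hpos : d.getD a 0 > 0
    · simp only [List.foldl_cons, hpos, if_pos]
      set d' := d.insert a (d.getD a 0 - 1) with hd'
      have hd'get : ∀ y, d'.getD y 0 = if y = a then d.getD a 0 - 1 else d.getD y 0 := by
        intro y; rw [hd', PySem.Dict.getD_insert]
      have hd'nn : ∀ x, 0 ≤ d'.getD x 0 := by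
        intro x; rw [hd'get]; split_ifs with h
        · omega
        · exact hd x
      rw [ih (acc + 1) d' hd'nn]
      by_cases hmem : a ∈ t
      · have htf : (a :: t).toFinset = t.toFinset := by
          simp [List.toFinset_cons, List.mem_toFinset, hmem]
        rw [htf]
        have hatf : a ∈ t.toFinset := List.mem_toFinset.mpr hmem
        rw [← Finset.add_sum_erase _ _ hatf, ← Finset.add_sum_erase _ _ hatf]
        have hterm : (1 : Int) + min (d'.getD a 0) ((t.count a : Int))
            = min (d.getD a 0) (((a :: t).count a : Int)) := by
          rw [hd'get, if_pos rfl, hcnt a, if_pos rfl]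
          have : (0 : Int) ≤ (t.count a : Int) := Int.natCast_nonneg _
          omega
        have hrest : ∀ y ∈ t.toFinset.erase a,
            min (d'.getD y 0) ((t.count y : Int)) = min (d.getD y 0) (((a :: t).count y : Int)) := by
          intro y hy
          have hya : y ≠ a := (Finset.mem_erase.mp hy).1
          rw [hd'get, if_neg hya, hcnt y, if_neg hya, add_zero]
        rw [Finset.sum_congr rfl hrest]
        omega
      · have hta : (t.count a : Int) = 0 := by
          simp [List.count_eq_zero_of_not_mem hmem]
        have htf : (a :: t).toFinset = insert a t.toFinset := by simp
        have hna : a ∉ t.toFinset := by simp [List.mem_toFinset, hmem]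
        rw [htf, Finset.sum_insert hna]
        have hterm : min (d.getD a 0) (((a :: t).count a : Int)) = 1 := by
          rw [hcnt a, if_pos rfl, hta]; omega
        have hrest : ∀ y ∈ t.toFinset,
            min (d'.getD y 0) ((t.count y : Int)) = min (d.getD y 0) (((a :: t).count y : Int)) := by
          intro y hy
          have hya : y ≠ a := fun h => hna (h ▸ hy)
          rw [hd'get, if_neg hya, hcnt y, if_neg hya, add_zero]
        rw [Finset.sum_congr rfl hrest, hterm]
        omega
    · simp only [List.foldl_cons, hpos, if_false]
      rw [ih acc d hd]
      have hda : d.getD a 0 = 0 := le_antisymm (by omega) (hd a)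
      by_cases hmem : a ∈ t
      · have htf : (a :: t).toFinset = t.toFinset := by
          simp [List.toFinset_cons, List.mem_toFinset, hmem]
        rw [htf]
        apply congrArg (acc + ·)
        apply Finset.sum_congr rfl
        intro y hy
        by_cases hya : y = a
        · subst hya
          rw [hda, hcnt y, if_pos rfl]
          have : (0 : Int) ≤ (t.count y : Int) := Int.natCast_nonneg _
          omega
        · rw [hcnt y, if_neg hya, add_zero]
      · have htf : (a :: t).toFinset = insert a t.toFinset := by simp
        have hna : a ∉ t.toFinset := by simp [List.mem_toFinset, hmem]
        rw [htf, Finset.sum_insert hna]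
        have hterm : min (d.getD a 0) (((a :: t).count a : Int)) = 0 := by
          rw [hda]
          have : (0 : Int) ≤ (((a :: t).count a : Int)) := Int.natCast_nonneg _
          omega
        have hrest : ∀ y ∈ t.toFinset,
            min (d.getD y 0) ((t.count y : Int)) = min (d.getD y 0) (((a :: t).count y : Int)) := by
          intro y hy
          have hya : y ≠ a := fun h => hna (h ▸ hy)
          rw [hcnt y, if_neg hya, add_zero]
        rw [Finset.sum_congr rfl hrest, hterm]
        omega

theorem pv_B_eq (l1 l2 : List Int) : remove_common_counts_alt l1 l2 = pvMinSum l1 l2 := by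
  unfold remove_common_counts_alt pvMinSum
  have hcnt : ∀ v, (l1.foldl (fun d x => d.insert x (d.getD x 0 + 1)) PySem.Dict.empty).getD v 0
      = (l1.count v : Int) := by
    intro v
    rw [PySem.Dict.getD_foldl_insert_add_one, PySem.Dict.getD_empty, zero_add]
  rw [pv_loop_eq_sum l2 0 _ (fun x => by rw [hcnt]; exact Int.natCast_nonneg _), zero_add]
  exact Finset.sum_congr rfl (fun x _ => by rw [hcnt])

theorem pv_A_eq (l1 l2 : List Int) : remove_common_counts l1 l2 = pvMinSum l1 l2 := by
  unfold remove_common_counts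
  set common := PySem.Set.inter (PySem.Set.ofList l1) (PySem.Set.ofList l2) with hc
  have hstep : common.foldl (fun count c =>
      if PySem.List.count l1 c < PySem.List.count l2 c then count + (PySem.List.count l1 c : Int)
      else if PySem.List.count l1 c > PySem.List.count l2 c then count + (PySem.List.count l2 c : Int)
      else count + (PySem.List.count l1 c : Int)) 0
      = common.foldl (fun count c => count + min ((l1.count c : Int)) ((l2.count c : Int))) 0 := by
    apply PySem.List.foldl_congr_mem
    intro acc x _
    simp only [PySem.List.count_eq]
    rcases lt_trichotomy (l1.count x) (l2.count x) with h | h | h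
    · rw [if_pos h]
      have : min ((l1.count x : Int)) ((l2.count x : Int)) = (l1.count x : Int) := by
        apply min_eq_left; exact_mod_cast le_of_lt h
      omega
    · rw [if_neg (by omega), if_neg (by omega), h, min_self]
    · rw [if_neg (by omega), if_pos h]
      have : min ((l1.count x : Int)) ((l2.count x : Int)) = (l2.count x : Int) := by
        apply min_eq_right; exact_mod_cast le_of_lt h
      omega
  rw [hstep, PySem.List.foldl_add, zero_add]
  -- sum over the common elements = sum over distinct elements of l2
  have hnodup : common.Nodup :=
    PySem.Set.nodup_inter _ _ (PySem.Set.nodup_ofList l1)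
  have hmemc : ∀ x, x ∈ common ↔ x ∈ l1 ∧ x ∈ l2 := by
    intro x
    rw [hc, PySem.Set.mem_inter]
    simp [PySem.Set.mem_ofList]
  have h1 : (common.map (fun c => min ((l1.count c : Int)) ((l2.count c : Int)))).sum
      = ∑ x ∈ common.toFinset, min ((l1.count x : Int)) ((l2.count x : Int)) :=
    List.sum_toFinset _ hnodup |>.symm
  rw [h1]
  unfold pvMinSum
  apply Finset.sum_subset
  · intro x hx
    rw [List.mem_toFinset] at hx ⊢
    exact ((hmemc x).mp hx).2
  · intro x hx hnx
    rw [List.mem_toFinset] at hx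
    rw [List.mem_toFinset, hmemc] at hnx
    have h1 : x ∉ l1 := fun h => hnx ⟨h, hx⟩
    have h2 : l1.count x = 0 := List.count_eq_zero_of_not_mem h1
    have h0 : (0 : Int) ≤ (l2.count x : Int) := Int.natCast_nonneg _
    rw [h2]
    push_cast
    omega

-- ===== VERDICT (by name: the statement is the Claim_ definition above) =====
theorem remove_common_counts_spec : Claim_equal_remove_common_counts := by
  intro l1 l2 _
  unfold Spec_remove_common_counts
  rw [pv_A_eq, pv_B_eq]
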